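-- pv_equiv track=rewrite | github.com/delalamo/SAbR | src/sabr/util.py | has_gap_in_region
-- ===== SOURCE A (Python) =====
-- from typing import FrozenSet
--
-- def has_gap_in_region(
--     gap_indices: FrozenSet[int],
--     start_row: int,
--     end_row: int,
-- ) -> bool:
--     """Check if there is a structural gap within a region of residues.
--
--     A gap at index i represents a structural break between residue i and
--     residue i+1 (the C-N peptide bond distance is too large). This function
--     checks whether any such gap would split the region.
--
--     Args:
--         gap_indices: FrozenSet of indices where gaps occur. A gap at index i
--             indicates a break between residues at rows i and i+1.
--         start_row: First row index of the region (inclusive).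
--         end_row: Last row index of the region (inclusive).
--
--     Returns:
--         True if any internal gap exists. We check gap indices from start_row
--         to end_row-1 because a gap at index i affects residues i and i+1;
--         a gap at end_row would be between end_row and end_row+1, which extends
--         outside the region.
--
--     Example:
--         For region [5, 10] inclusive, we check gap indices 5-9:
--         - gap 5: break between residues 5-6 (both in region)
--         - gap 9: break between residues 9-10 (both in region)
--         - gap 10: break between residues 10-11 (11 is outside region)
--     """
--     for i in range(start_row, end_row):
--         if i in gap_indices:
--             return True
--     return False
-- ===== SOURCE B (Python) =====
-- from typing import FrozenSet
--
-- def has_gap_in_region(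
--     gap_indices: FrozenSet[int],
--     start_row: int,
--     end_row: int,
-- ) -> bool:
--     """Iterate over the gap set itself rather than scanning every row index."""
--     return any(start_row <= g < end_row for g in gap_indices)
-- ===== Notes on version B (the rewrite author's own statement) =====
-- stated objective: alternative
-- what changed: Iterates over the gap-index set testing start_row <= g < end_row instead of scanning every row index of range(start_row, end_row) and testing set membership; cost depends on |gap_indices| rather than the region width.
import Mathlib
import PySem

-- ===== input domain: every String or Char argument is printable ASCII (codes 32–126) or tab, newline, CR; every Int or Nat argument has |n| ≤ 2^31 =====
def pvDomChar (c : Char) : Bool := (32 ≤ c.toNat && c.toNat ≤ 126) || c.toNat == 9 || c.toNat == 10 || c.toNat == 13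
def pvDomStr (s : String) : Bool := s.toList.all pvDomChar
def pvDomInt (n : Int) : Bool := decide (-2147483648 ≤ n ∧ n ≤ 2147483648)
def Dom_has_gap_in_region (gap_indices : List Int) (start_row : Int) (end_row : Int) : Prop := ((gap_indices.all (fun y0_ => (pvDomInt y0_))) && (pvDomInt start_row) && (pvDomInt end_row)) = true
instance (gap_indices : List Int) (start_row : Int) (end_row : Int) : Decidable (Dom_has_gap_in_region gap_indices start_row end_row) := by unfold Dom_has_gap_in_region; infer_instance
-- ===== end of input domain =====

-- B iterates over the sparse gap set instead of the dense row range (alternative decomposition; cost scales with |gap_indices| instead of region width).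


-- ===== PORT A =====
-- 'for i in range(start_row, end_row): if i in gap_indices: return True' / 'return False'
def has_gap_in_region (gap_indices : List Int) (start_row : Int) (end_row : Int) : Bool :=
  (PySem.List.pyRange start_row end_row 1).any (fun i => gap_indices.contains i)

-- ===== PORT B =====
-- 'return any(start_row <= g < end_row for g in gap_indices)'
def has_gap_in_region_alt (gap_indices : List Int) (start_row : Int) (end_row : Int) : Bool :=
  gap_indices.any (fun g => decide (start_row ≤ g) && decide (g < end_row))

-- ===== PRECONDITION & SPEC =====
def Spec_has_gap_in_region (gap_indices : List Int) (start_row : Int) (end_row : Int) (out : Bool) : Prop := out = has_gap_in_region_alt gap_indices start_row end_row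
instance (gap_indices : List Int) (start_row : Int) (end_row : Int) (out : Bool) : Decidable (Spec_has_gap_in_region gap_indices start_row end_row out) := by unfold Spec_has_gap_in_region; infer_instance

-- ===== CLAIM (what is proved, stated in full; the proofs are below) =====
def Claim_equal_has_gap_in_region : Prop := ∀ (gap_indices : List Int) (start_row : Int) (end_row : Int), Dom_has_gap_in_region gap_indices start_row end_row → Spec_has_gap_in_region gap_indices start_row end_row (has_gap_in_region gap_indices start_row end_row)

-- ===== LEMMAS AND PROOFS =====

-- ===== VERDICT (by name: the statement is the Claim_ definition above) =====
theorem has_gap_in_region_spec : Claim_equal_has_gap_in_region := by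
  intro gap_indices start_row end_row _
  unfold Spec_has_gap_in_region has_gap_in_region has_gap_in_region_alt
  rw [Bool.eq_iff_iff]
  simp only [List.any_eq_true, List.contains_eq_mem, decide_eq_true_eq,
    PySem.List.mem_pyRange_one, Bool.and_eq_true]
  constructor
  · rintro ⟨i, ⟨h1, h2⟩, hm⟩; exact ⟨i, hm, h1, h2⟩
  · rintro ⟨g, hm, h1, h2⟩; exact ⟨g, ⟨h1, h2⟩, hm⟩
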